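-- pv_equiv track=rewrite | github.com/manuelschipper/nah | src/nah/bash.py | _find_exec_payloads
-- ===== SOURCE A (Python) =====
-- _FIND_EXEC_PREDICATES = frozenset({"-exec", "-execdir", "-ok", "-okdir"})
--
-- _FIND_EXEC_TERMINATORS = frozenset({";", "+"})
--
-- def _find_exec_payloads(tokens: list[str]) -> list[tuple[str, list[str], bool]]:
--     payloads: list[tuple[str, list[str], bool]] = []
--     i = 1
--     while i < len(tokens):
--         tok = tokens[i]
--         if tok not in _FIND_EXEC_PREDICATES:
--             i += 1
--             continue
--
--         payload: list[str] = []
--         j = i + 1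
--         while j < len(tokens) and tokens[j] not in _FIND_EXEC_TERMINATORS:
--             payload.append(tokens[j])
--             j += 1
--         has_terminator = j < len(tokens) and tokens[j] in _FIND_EXEC_TERMINATORS
--         payloads.append((tok, payload, has_terminator))
--         i = j + 1 if has_terminator else len(tokens)
--     return payloads
-- ===== SOURCE B (Python) =====
-- _FIND_EXEC_PREDICATES = frozenset({"-exec", "-execdir", "-ok", "-okdir"})
-- _FIND_EXEC_TERMINATORS = frozenset({";", "+"})
--
-- def _find_exec_payloads(tokens):
--     payloads = []
--     collecting = False
--     pred = ""
--     payload = []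
--     for tok in tokens[1:]:
--         if not collecting:
--             if tok in _FIND_EXEC_PREDICATES:
--                 collecting = True
--                 pred = tok
--                 payload = []
--         elif tok in _FIND_EXEC_TERMINATORS:
--             payloads.append((pred, payload, True))
--             collecting = False
--         else:
--             payload.append(tok)
--     if collecting:
--         payloads.append((pred, payload, False))
--     return payloads
-- ===== Notes on version B (the rewrite author's own statement) =====
-- stated objective: simpler
-- what changed: Replaces A's nested while loops with manual index arithmetic (i/j, inner payload-collection scan) by a single flat for-loop over tokens[1:] driven by a 'collecting' flag and a payload accumulator, flushing an open payload after the loop.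
import Mathlib
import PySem

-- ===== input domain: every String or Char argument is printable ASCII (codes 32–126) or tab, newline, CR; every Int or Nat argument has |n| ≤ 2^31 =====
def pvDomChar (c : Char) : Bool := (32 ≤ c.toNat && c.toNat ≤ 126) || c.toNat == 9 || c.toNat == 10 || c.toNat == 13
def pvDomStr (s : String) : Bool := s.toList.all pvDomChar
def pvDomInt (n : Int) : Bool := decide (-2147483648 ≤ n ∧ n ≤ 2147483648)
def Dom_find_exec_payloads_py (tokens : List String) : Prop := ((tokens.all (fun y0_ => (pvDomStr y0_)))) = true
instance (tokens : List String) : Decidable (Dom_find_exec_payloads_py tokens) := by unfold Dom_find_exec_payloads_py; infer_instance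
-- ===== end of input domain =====

-- B replaces A's nested while loops with manual index arithmetic by one flat
-- state-machine pass (collecting flag + accumulator); objective: simpler.

-- ===== PORT A =====
def pvPreds : List String := ["-exec", "-execdir", "-ok", "-okdir"]
def pvTerms : List String := [";", "+"]

-- inner while loop of A: collect payload until a terminator; returns (payload, rest)
def pvCollectA : List String → List String × List String
  | [] => ([], [])
  | t :: ts =>
    if t ∈ pvTerms then ([], t :: ts)
    else (t :: (pvCollectA ts).1, (pvCollectA ts).2)

theorem pvCollectA_rest_le (ts : List String) : (pvCollectA ts).2.length ≤ ts.length := by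
  induction ts with
  | nil => simp [pvCollectA]
  | cons t ts ih =>
    simp only [pvCollectA]
    split_ifs
    · simp
    · simpa using Nat.le_succ_of_le ih

-- outer while loop of A over the suffix starting at index 1; the inner loop stops
-- only at terminators, so Python's 'has_terminator' is exactly 'rest is nonempty'.
def pvFindA : List String → List (String × List String × Bool)
  | [] => []
  | t :: ts =>
    if t ∈ pvPreds then
      match _h : (pvCollectA ts).2 with
      | _ :: rs => (t, (pvCollectA ts).1, true) :: pvFindA rs
      | [] => [(t, (pvCollectA ts).1, false)]
    else pvFindA ts
termination_by l => l.length
decreasing_by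
  · have hle := pvCollectA_rest_le ts
    rw [_h] at hle
    simp only [List.length_cons] at hle ⊢
    omega
  · simp

def find_exec_payloads_py (tokens : List String) : List (String × List String × Bool) :=
  pvFindA (tokens.drop 1)

-- ===== PORT B =====
-- one step of B's state machine; state = (payloads so far, optionally (pred, payload))
def pvStepB (st : List (String × List String × Bool) × Option (String × List String))
    (tok : String) : List (String × List String × Bool) × Option (String × List String) :=
  match st with
  | (acc, none) => if tok ∈ pvPreds then (acc, some (tok, [])) else (acc, none)
  | (acc, some (p, pl)) =>
    if tok ∈ pvTerms then (acc ++ [(p, pl, true)], none)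
    else (acc, some (p, pl ++ [tok]))

-- after the loop: flush a still-open payload with has_terminator = false
def pvFinish (st : List (String × List String × Bool) × Option (String × List String)) :
    List (String × List String × Bool) :=
  match st with
  | (acc, none) => acc
  | (acc, some (p, pl)) => acc ++ [(p, pl, false)]

def find_exec_payloads_py_alt (tokens : List String) : List (String × List String × Bool) :=
  pvFinish ((tokens.drop 1).foldl pvStepB ([], none))

-- ===== PRECONDITION & SPEC =====
def Spec_find_exec_payloads_py (tokens : List String) (out : List (String × List String × Bool)) : Prop := out = find_exec_payloads_py_alt tokens
instance (tokens : List String) (out : List (String × List String × Bool)) : Decidable (Spec_find_exec_payloads_py tokens out) := by unfold Spec_find_exec_payloads_py; infer_instance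

-- ===== CLAIM (what is proved, stated in full; the proofs are below) =====
def Claim_equal_find_exec_payloads_py : Prop := ∀ (tokens : List String), Dom_find_exec_payloads_py tokens → Spec_find_exec_payloads_py tokens (find_exec_payloads_py tokens)

-- ===== LEMMAS AND PROOFS =====

-- Both states of B's machine, characterised against A's two loops, by strong
-- induction on the length of the remaining token list.
theorem pvKey : ∀ (n : ℕ) (l : List String), l.length ≤ n →
    (∀ acc, pvFinish (l.foldl pvStepB (acc, none)) = acc ++ pvFindA l) ∧
    (∀ acc p pl, pvFinish (l.foldl pvStepB (acc, some (p, pl))) =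
      acc ++ (match (pvCollectA l).2 with
        | _ :: rs => (p, pl ++ (pvCollectA l).1, true) :: pvFindA rs
        | [] => [(p, pl ++ (pvCollectA l).1, false)])) := by
  intro n
  induction n with
  | zero =>
    intro l hl
    have : l = [] := List.eq_nil_of_length_eq_zero (Nat.le_zero.mp hl)
    subst this
    constructor
    · intro acc; simp [pvFinish, pvFindA]
    · intro acc p pl; simp [pvFinish, pvCollectA]
  | succ n ih =>
    intro l hl
    cases l with
    | nil =>
      constructor
      · intro acc; simp [pvFinish, pvFindA]
      · intro acc p pl; simp [pvFinish, pvCollectA]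
    | cons t ts =>
      have hts : ts.length ≤ n := by simpa using Nat.succ_le_succ_iff.mp hl
      constructor
      · intro acc
        by_cases hp : t ∈ pvPreds
        · simp only [List.foldl_cons, pvStepB, if_pos hp]
          rw [(ih ts hts).2 acc t []]
          rw [pvFindA]
          simp only [if_pos hp, List.nil_append]
          cases hr : (pvCollectA ts).2 with
          | nil => simp
          | cons r rs => simp
        · simp only [List.foldl_cons, pvStepB, if_neg hp]
          rw [(ih ts hts).1 acc]
          rw [pvFindA]
          simp [hp]
      · intro acc p pl
        by_cases ht : t ∈ pvTerms
        · simp only [List.foldl_cons, pvStepB, if_pos ht]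
          rw [(ih ts hts).1 (acc ++ [(p, pl, true)])]
          have hc : pvCollectA (t :: ts) = ([], t :: ts) := by
            simp [pvCollectA, ht]
          simp [hc]
        · simp only [List.foldl_cons, pvStepB, if_neg ht]
          rw [(ih ts hts).2 acc p (pl ++ [t])]
          have hc : pvCollectA (t :: ts)
              = (t :: (pvCollectA ts).1, (pvCollectA ts).2) := by
            simp [pvCollectA, ht]
          rw [hc]
          cases hr : (pvCollectA ts).2 with
          | nil => simp
          | cons r rs => simp

-- ===== VERDICT (by name: the statement is the Claim_ definition above) =====
theorem find_exec_payloads_py_spec : Claim_equal_find_exec_payloads_py := by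
  intro tokens _
  unfold Spec_find_exec_payloads_py find_exec_payloads_py find_exec_payloads_py_alt
  rw [(pvKey (tokens.drop 1).length (tokens.drop 1) le_rfl).1 []]
  simp
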